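-- pv_equiv track=rewrite | github.com/270aldo/nexus.core | backend/app/apis/coach_assistant/__init__.py | extract_suggested_actions
-- ===== SOURCE A (Python) =====
-- from typing import List, Optional, Dict, Any, Union
--
-- def extract_suggested_actions(response: str) -> List[str]:
--     """Extract suggested actions from the assistant response"""
--     # In production, this would use more sophisticated NLP
--     # For now, we'll use a simple approach based on the mock responses
--
--     actions = []
--
--     if "adherence" in response.lower():
--         actions.append("Schedule automated weekend check-ins")
--         actions.append("Update nutrition guidelines for social situations")
--
--     if "program" in response.lower() and any(x in response.lower() for x in ["modify", "adjustment", "change", "increase"]):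
--         actions.append("Adjust program in Training Management module")
--         actions.append("Schedule follow-up assessment in 2 weeks")
--
--     if "nutrition" in response.lower():
--         actions.append("Review nutrition plan in Nutrition Management module")
--
--     if "recovery" in response.lower():
--         actions.append("Update recovery protocols")
--
--     # Always provide at least one generic action if none were identified
--     if not actions:
--         actions.append("Log this conversation in client notes")
--         actions.append("Schedule follow-up assessment")
--
--     return actions
-- ===== SOURCE B (Python) =====
-- def extract_suggested_actions(response):
--     """Extract suggested actions from the assistant response"""
--     t = response.lower()
--     keywords = ["adherence", "program", "modify", "adjustment",
--                 "change", "increase", "nutrition", "recovery"]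
--     # single left-to-right scan: at each position record every keyword starting there
--     found = set()
--     for i in range(len(t)):
--         for k in keywords:
--             if k not in found and t.startswith(k, i):
--                 found.add(k)
--     actions = []
--     if "adherence" in found:
--         actions += ["Schedule automated weekend check-ins",
--                     "Update nutrition guidelines for social situations"]
--     if "program" in found and any(x in found for x in ["modify", "adjustment", "change", "increase"]):
--         actions += ["Adjust program in Training Management module",
--                     "Schedule follow-up assessment in 2 weeks"]
--     if "nutrition" in found:
--         actions += ["Review nutrition plan in Nutrition Management module"]
--     if "recovery" in found:
--         actions += ["Update recovery protocols"]
--     if not actions: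
--         actions = ["Log this conversation in client notes",
--                    "Schedule follow-up assessment"]
--     return actions
-- ===== Notes on version B (the rewrite author's own statement) =====
-- stated objective: alternative
-- what changed: Replaces the four independent per-keyword substring tests on the lowered response with a single left-to-right scan over the lowered text that collects every occurring keyword into a set in one pass, followed by a separate flags-to-actions assembly stage.
import Mathlib
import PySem

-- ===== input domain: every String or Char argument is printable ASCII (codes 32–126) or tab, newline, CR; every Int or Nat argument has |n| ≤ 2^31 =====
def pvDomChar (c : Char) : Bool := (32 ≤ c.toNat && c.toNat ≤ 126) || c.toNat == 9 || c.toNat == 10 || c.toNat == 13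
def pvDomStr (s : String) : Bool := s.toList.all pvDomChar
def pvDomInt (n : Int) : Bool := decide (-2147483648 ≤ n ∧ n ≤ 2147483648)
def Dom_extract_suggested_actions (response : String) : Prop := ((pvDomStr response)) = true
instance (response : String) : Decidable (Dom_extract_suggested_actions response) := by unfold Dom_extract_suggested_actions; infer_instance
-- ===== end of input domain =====

-- B replaces the per-keyword substring tests by a single left-to-right scan collecting all occurring keywords into a set, then assembles actions from the flags (objective: alternative); same return value proved below.


-- ===== PORT A =====
def extract_suggested_actions (response : String) : List String :=
  let actions : List String := []
  let actions := if PySem.Str.isIn "adherence" (PySem.Str.lower response) then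
      actions ++ ["Schedule automated weekend check-ins"] ++ ["Update nutrition guidelines for social situations"]
    else actions
  let actions := if PySem.Str.isIn "program" (PySem.Str.lower response) &&
      ["modify", "adjustment", "change", "increase"].any (fun x => PySem.Str.isIn x (PySem.Str.lower response)) then
      actions ++ ["Adjust program in Training Management module"] ++ ["Schedule follow-up assessment in 2 weeks"]
    else actions
  let actions := if PySem.Str.isIn "nutrition" (PySem.Str.lower response) then
      actions ++ ["Review nutrition plan in Nutrition Management module"]
    else actions
  let actions := if PySem.Str.isIn "recovery" (PySem.Str.lower response) then
      actions ++ ["Update recovery protocols"]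
    else actions
  let actions := if actions.isEmpty then
      actions ++ ["Log this conversation in client notes"] ++ ["Schedule follow-up assessment"]
    else actions
  actions

-- ===== PORT B =====
def pvKeywords : List String :=
  ["adherence", "program", "modify", "adjustment", "change", "increase", "nutrition", "recovery"]

-- 'for i in range(len(t)): for k in keywords: if k not in found and t.startswith(k, i): found.add(k)'
-- t.startswith(k, i) with 0 ≤ i is exactly k.toList.isPrefixOf (t.drop i)
def pvScan (t : List Char) : PySem.Set String :=
  (List.range t.length).foldl
    (fun found i =>
      pvKeywords.foldl
        (fun fd k =>
          if !(PySem.Set.contains fd k) && k.toList.isPrefixOf (t.drop i) then PySem.Set.add fd k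
          else fd)
        found)
    PySem.Set.empty

def extract_suggested_actions_alt (response : String) : List String :=
  let found := pvScan (PySem.Str.lower response).toList
  let actions : List String := []
  let actions := if PySem.Set.contains found "adherence" then
      actions ++ ["Schedule automated weekend check-ins", "Update nutrition guidelines for social situations"]
    else actions
  let actions := if PySem.Set.contains found "program" &&
      ["modify", "adjustment", "change", "increase"].any (fun x => PySem.Set.contains found x) then
      actions ++ ["Adjust program in Training Management module", "Schedule follow-up assessment in 2 weeks"]
    else actions
  let actions := if PySem.Set.contains found "nutrition" then
      actions ++ ["Review nutrition plan in Nutrition Management module"]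
    else actions
  let actions := if PySem.Set.contains found "recovery" then
      actions ++ ["Update recovery protocols"]
    else actions
  if actions.isEmpty then ["Log this conversation in client notes", "Schedule follow-up assessment"]
  else actions

-- ===== PRECONDITION & SPEC =====
def Spec_extract_suggested_actions (response : String) (out : List String) : Prop := out = extract_suggested_actions_alt response
instance (response : String) (out : List String) : Decidable (Spec_extract_suggested_actions response out) := by unfold Spec_extract_suggested_actions; infer_instance

-- ===== CLAIM (what is proved, stated in full; the proofs are below) =====
def Claim_equal_extract_suggested_actions : Prop := ∀ (response : String), Dom_extract_suggested_actions response → Spec_extract_suggested_actions response (extract_suggested_actions response)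

-- ===== LEMMAS AND PROOFS =====

-- membership after one scanner step
theorem pv_mem_step (t : List Char) (i : Nat) (fd : PySem.Set String) (k' k : String) :
    k ∈ (if !(PySem.Set.contains fd k') && k'.toList.isPrefixOf (t.drop i) then PySem.Set.add fd k'
         else fd) ↔ k ∈ fd ∨ (k = k' ∧ k.toList <+: t.drop i) := by
  by_cases hmem : k' ∈ fd
  · have hc : PySem.Set.contains fd k' = true := (PySem.Set.contains_iff fd k').2 hmem
    simp only [hc, Bool.not_true, Bool.false_and, Bool.false_eq_true, if_false]
    constructor
    · exact Or.inl
    · rintro (h | ⟨rfl, -⟩)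
      · exact h
      · exact hmem
  · have hc : PySem.Set.contains fd k' = false := by
      rw [Bool.eq_false_iff]
      intro h
      exact hmem ((PySem.Set.contains_iff fd k').1 h)
    by_cases hpre : k'.toList <+: t.drop i
    · simp only [hc, Bool.not_false, Bool.true_and, List.isPrefixOf_iff_prefix.2 hpre, if_true,
        PySem.Set.add_of_not_mem hmem, List.mem_append, List.mem_singleton]
      constructor
      · rintro (h | rfl)
        · exact Or.inl h
        · exact Or.inr ⟨rfl, hpre⟩
      · rintro (h | ⟨rfl, -⟩)
        · exact Or.inl h
        · exact Or.inr rfl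
    · have hp : k'.toList.isPrefixOf (t.drop i) = false := by
        rw [Bool.eq_false_iff]
        intro h
        exact hpre (List.isPrefixOf_iff_prefix.1 h)
      simp only [hp, Bool.and_false, Bool.false_eq_true, if_false]
      constructor
      · exact Or.inl
      · rintro (h | ⟨rfl, h⟩)
        · exact h
        · exact absurd h hpre

-- membership in the inner per-position fold
theorem pv_mem_inner (K : List String) (t : List Char) (i : Nat) (fd : PySem.Set String) (k : String) :
    k ∈ K.foldl
        (fun fd k' =>
          if !(PySem.Set.contains fd k') && k'.toList.isPrefixOf (t.drop i) then PySem.Set.add fd k'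
          else fd)
        fd ↔ k ∈ fd ∨ (k ∈ K ∧ k.toList <+: t.drop i) := by
  induction K generalizing fd with
  | nil => simp
  | cons k' K ih =>
      simp only [List.foldl_cons, ih, pv_mem_step, List.mem_cons]
      tauto

-- membership in the outer fold over a list of positions
theorem pv_mem_outer (L : List Nat) (t : List Char) (fd : PySem.Set String) (k : String) :
    k ∈ L.foldl
        (fun found i =>
          pvKeywords.foldl
            (fun fd k' =>
              if !(PySem.Set.contains fd k') && k'.toList.isPrefixOf (t.drop i) then PySem.Set.add fd k'
              else fd)
            found)
        fd ↔ k ∈ fd ∨ (k ∈ pvKeywords ∧ ∃ i ∈ L, k.toList <+: t.drop i) := by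
  induction L generalizing fd with
  | nil => simp
  | cons i L ih =>
      simp only [List.foldl_cons, ih, pv_mem_inner]
      constructor
      · rintro ((h | h) | ⟨hk, j, hj, hp⟩)
        · exact Or.inl h
        · exact Or.inr ⟨h.1, i, by simp, h.2⟩
        · exact Or.inr ⟨hk, j, by simp [hj], hp⟩
      · rintro (h | ⟨hk, j, hj, hp⟩)
        · exact Or.inl (Or.inl h)
        · rcases List.mem_cons.1 hj with rfl | hj
          · exact Or.inl (Or.inr ⟨hk, hp⟩)
          · exact Or.inr ⟨hk, j, hj, hp⟩

-- the scanner finds exactly the keywords occurring as substrings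
theorem pv_scan_contains (t : List Char) (k : String) (hk : k ∈ pvKeywords) (hne : k.toList ≠ []) :
    PySem.Set.contains (pvScan t) k = PySem.Chars.isIn k.toList t := by
  cases h : PySem.Chars.isIn k.toList t
  · rw [PySem.Set.contains_eq_listContains]
    simp only [List.contains_eq_mem, decide_eq_false_iff_not]
    unfold pvScan
    rw [pv_mem_outer]
    rintro (hmem | ⟨-, j, hj, hp⟩)
    · simp [PySem.Set.empty] at hmem
    · exact absurd ((PySem.Chars.exists_prefix_drop_iff_isIn _ _).1 ⟨j, hp⟩) (by simp [h])
  · rcases (PySem.Chars.exists_prefix_drop_iff_isIn k.toList t).2 h with ⟨j, hp⟩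
    have hjlt : j < t.length := by
      rcases Nat.lt_or_ge j t.length with h | h
      · exact h
      · rw [List.drop_eq_nil_of_le h] at hp
        exact absurd (List.prefix_nil.1 hp) hne
    rw [PySem.Set.contains_eq_listContains]
    simp only [List.contains_eq_mem, decide_eq_true_eq]
    unfold pvScan
    rw [pv_mem_outer]
    exact Or.inr ⟨hk, j, List.mem_range.2 hjlt, hp⟩

-- ===== VERDICT (by name: the statement is the Claim_ definition above) =====
theorem extract_suggested_actions_spec : Claim_equal_extract_suggested_actions := by
  intro response _
  unfold Spec_extract_suggested_actions extract_suggested_actions extract_suggested_actions_alt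
  have hc : ∀ k : String, k ∈ pvKeywords → k.toList ≠ [] →
      PySem.Set.contains (pvScan (PySem.Str.lower response).toList) k
        = PySem.Str.isIn k (PySem.Str.lower response) := by
    intro k hk hne
    rw [pv_scan_contains _ _ hk hne]
    simp [PySem.Str.isIn]
  simp only [List.any_cons, List.any_nil,
      hc "adherence" (by simp [pvKeywords]) (by decide),
      hc "program" (by simp [pvKeywords]) (by decide),
      hc "modify" (by simp [pvKeywords]) (by decide),
      hc "adjustment" (by simp [pvKeywords]) (by decide),
      hc "change" (by simp [pvKeywords]) (by decide),
      hc "increase" (by simp [pvKeywords]) (by decide),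
      hc "nutrition" (by simp [pvKeywords]) (by decide),
      hc "recovery" (by simp [pvKeywords]) (by decide)]
  have key : ∀ (c1 c2 c3 c4 : Bool),
      (let a0 : List String := [];
       let a1 := if c1 then a0 ++ ["Schedule automated weekend check-ins"] ++ ["Update nutrition guidelines for social situations"] else a0;
       let a2 := if c2 then a1 ++ ["Adjust program in Training Management module"] ++ ["Schedule follow-up assessment in 2 weeks"] else a1;
       let a3 := if c3 then a2 ++ ["Review nutrition plan in Nutrition Management module"] else a2;
       let a4 := if c4 then a3 ++ ["Update recovery protocols"] else a3;
       let a5 := if a4.isEmpty then a4 ++ ["Log this conversation in client notes"] ++ ["Schedule follow-up assessment"] else a4;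
       a5)
      = (let b0 : List String := [];
         let b1 := if c1 then b0 ++ ["Schedule automated weekend check-ins", "Update nutrition guidelines for social situations"] else b0;
         let b2 := if c2 then b1 ++ ["Adjust program in Training Management module", "Schedule follow-up assessment in 2 weeks"] else b1;
         let b3 := if c3 then b2 ++ ["Review nutrition plan in Nutrition Management module"] else b2;
         let b4 := if c4 then b3 ++ ["Update recovery protocols"] else b3;
         if b4.isEmpty then ["Log this conversation in client notes", "Schedule follow-up assessment"] else b4) := by
    intro c1 c2 c3 c4
    cases c1 <;> cases c2 <;> cases c3 <;> cases c4 <;> rfl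
  exact key _ _ _ _
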